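-- pv_equiv track=rewrite | github.com/dev-bong/algorithms | programmers/correct/lv_1/again/부족한_금액_계산하기.py | solution
-- ===== SOURCE A (Python) =====
-- def solution(price, money, count):
--     total_price = 0
--     mul_count = sum([i for i in range(1, count+1)]) #? 이렇게 말고 등차수열의 합 공식으로..
--
--     total_price = price * mul_count
--
--     if total_price > money:
--         return total_price - money
--     else:
--         return 0
-- ===== SOURCE B (Python) =====
-- def solution(price, money, count):
--     n = count if count > 0 else 0
--     total = price * n * (n + 1) // 2
--     return max(total - money, 0)
-- ===== Notes on version B (the rewrite author's own statement) =====
-- stated objective: faster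
-- what changed: replaces the O(count) loop summing range(1,count+1) with the closed-form arithmetic-series formula count*(count+1)//2 and a max() instead of the branch
import Mathlib
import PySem

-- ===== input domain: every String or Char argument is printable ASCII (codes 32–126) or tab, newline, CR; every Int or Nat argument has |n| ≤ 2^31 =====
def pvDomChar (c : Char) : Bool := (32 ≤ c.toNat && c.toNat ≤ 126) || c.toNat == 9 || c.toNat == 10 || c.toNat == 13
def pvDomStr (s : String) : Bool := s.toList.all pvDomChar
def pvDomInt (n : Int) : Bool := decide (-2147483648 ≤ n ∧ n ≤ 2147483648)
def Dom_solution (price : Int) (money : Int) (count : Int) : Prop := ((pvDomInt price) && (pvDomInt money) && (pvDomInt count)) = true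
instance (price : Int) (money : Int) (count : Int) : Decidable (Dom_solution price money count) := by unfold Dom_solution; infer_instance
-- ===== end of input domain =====

-- B replaces A's O(count) loop over range(1,count+1) with the closed-form series sum count*(count+1)//2 (faster).

-- ===== PORT A =====
def solution (price : Int) (money : Int) (count : Int) : Int :=
  let mul_count := ((PySem.List.pyRange 1 (count + 1) 1).map (fun i => i)).foldl (· + ·) 0
  let total_price := price * mul_count
  if total_price > money then total_price - money else 0

-- ===== PORT B =====
def solution_alt (price : Int) (money : Int) (count : Int) : Int :=
  let n := if count > 0 then count else 0
  let total := PySem.Int.floordiv (price * n * (n + 1)) 2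
  max (total - money) 0

-- ===== PRECONDITION & SPEC =====
def Spec_solution (price : Int) (money : Int) (count : Int) (out : Int) : Prop := out = solution_alt price money count
instance (price : Int) (money : Int) (count : Int) (out : Int) : Decidable (Spec_solution price money count out) := by unfold Spec_solution; infer_instance

-- ===== CLAIM (what is proved, stated in full; the proofs are below) =====
def Claim_equal_solution : Prop := ∀ (price : Int) (money : Int) (count : Int), Dom_solution price money count → Spec_solution price money count (solution price money count)

-- ===== LEMMAS AND PROOFS =====

theorem pv_two_mul_sum (m : Nat) :
    2 * ((PySem.List.pyRange 1 ((m : Int) + 1) 1).foldl (· + ·) 0) = (m : Int) * (m + 1) := by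
  induction m with
  | zero => simp [PySem.List.pyRange_one_eq_nil]
  | succ k ih =>
    have h : ((k : Int) + 1) + 1 = (((k + 1 : Nat) : Int)) + 1 := by push_cast; ring
    rw [show (((k + 1 : Nat) : Int) + 1) = ((k : Int) + 1) + 1 by push_cast; ring,
        PySem.List.pyRange_one_succ_right (by omega)]
    rw [List.foldl_append]
    push_cast
    simp only [List.foldl]
    push_cast at ih
    nlinarith [ih]

theorem pv_floordiv_two_mul (x : Int) : PySem.Int.floordiv (2 * x) 2 = x := by
  rw [PySem.Int.floordiv_eq_iff_of_pos (by norm_num)]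
  omega

theorem solution_eq_alt (price money count : Int) :
    solution price money count = solution_alt price money count := by
  unfold solution solution_alt
  simp only [List.map_id_fun', id]
  by_cases hc : count > 0
  · have hn : (if count > 0 then count else 0) = count := if_pos hc
    rw [hn]
    have hm : count = ((count.toNat : Int)) := by omega
    have hsum := pv_two_mul_sum count.toNat
    rw [← hm] at hsum
    have : price * count * (count + 1) =
        2 * (price * ((PySem.List.pyRange 1 (count + 1) 1).foldl (· + ·) 0)) := by
      linear_combination (-price) * hsum
    rw [this, pv_floordiv_two_mul]
    set S := (PySem.List.pyRange 1 (count + 1) 1).foldl (· + ·) 0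
    split_ifs with h <;> omega
  · have hn : (if count > 0 then count else 0) = 0 := if_neg hc
    rw [hn, PySem.List.pyRange_one_eq_nil (by omega)]
    simp only [List.foldl_nil, mul_zero, zero_mul]
    rw [show PySem.Int.floordiv 0 2 = 0 from by decide]
    split_ifs with h <;> omega

-- ===== VERDICT (by name: the statement is the Claim_ definition above) =====
theorem solution_spec : Claim_equal_solution := by
  intro price money count _
  exact solution_eq_alt price money count
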